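-- pv_equiv track=rewrite | github.com/Pshypher/tpocup | ch07/exercises/exercise 53.py | alpha_with_and_without_holes
-- ===== SOURCE A (Python) =====
-- alpha_with_holes_lower = 'a','b','d','e','g','o','p','q'
--
-- alpha_with_holes_upper = 'A','B','D','O','P','Q','R'
--
-- def alpha_with_and_without_holes(S):
--     """Returns the number of characters with holes in S and the number
--         of characters without holes in S."""
--
--     with_holes = 0
--     without_holes = 0
--
--     for ch in S:
--         if ch in alpha_with_holes_lower or ch in alpha_with_holes_upper:
--             with_holes = with_holes+1
--         else:
--             without_holes = without_holes+1
--
--     return with_holes, without_holes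
-- ===== SOURCE B (Python) =====
-- _HOLES = 'abdegopqABDOPQR'
--
-- def alpha_with_and_without_holes(S):
--     """Returns the number of characters with holes in S and the number
--         of characters without holes in S."""
--     chars = list(S)
--     with_holes = sum(chars.count(c) for c in _HOLES)
--     return with_holes, len(chars) - with_holes
-- ===== Notes on version B (the rewrite author's own statement) =====
-- stated objective: alternative
-- what changed: Instead of scanning S once with a per-character two-way membership branch, B iterates over the fixed 15-letter hole alphabet, summing list.count of each hole letter, and derives the without-holes count as len(S) minus that sum.
import Mathlib
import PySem

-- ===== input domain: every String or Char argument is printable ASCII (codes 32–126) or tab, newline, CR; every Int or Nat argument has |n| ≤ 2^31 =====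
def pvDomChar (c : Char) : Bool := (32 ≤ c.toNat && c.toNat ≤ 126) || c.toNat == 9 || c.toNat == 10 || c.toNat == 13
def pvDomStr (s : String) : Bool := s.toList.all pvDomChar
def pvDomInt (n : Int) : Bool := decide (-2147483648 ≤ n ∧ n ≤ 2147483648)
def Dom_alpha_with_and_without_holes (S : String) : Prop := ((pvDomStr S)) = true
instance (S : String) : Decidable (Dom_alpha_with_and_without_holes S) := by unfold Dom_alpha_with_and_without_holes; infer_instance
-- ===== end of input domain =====

-- B replaces A's per-character branch scan with a sum of list.count over the fixed hole alphabet (alternative, same cost).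


-- ===== PORT A =====
def alphaWithHolesLower : List Char := ['a','b','d','e','g','o','p','q']
def alphaWithHolesUpper : List Char := ['A','B','D','O','P','Q','R']

def alpha_with_and_without_holes (S : String) : Int × Int :=
  S.toList.foldl
    (fun (st : Int × Int) ch =>
      if ch ∈ alphaWithHolesLower ∨ ch ∈ alphaWithHolesUpper then (st.1 + 1, st.2)
      else (st.1, st.2 + 1))
    (0, 0)

-- ===== PORT B =====
-- the string literal _HOLES = 'abdegopqABDOPQR' as a list of characters
def pvHoles : List Char := ['a','b','d','e','g','o','p','q','A','B','D','O','P','Q','R']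

def alpha_with_and_without_holes_alt (S : String) : Int × Int :=
  let chars := S.toList
  let with_holes : Int := (pvHoles.map (fun c => (PySem.List.count chars c : Int))).sum
  (with_holes, (chars.length : Int) - with_holes)

-- ===== PRECONDITION & SPEC =====
def Spec_alpha_with_and_without_holes (S : String) (out : Int × Int) : Prop := out = alpha_with_and_without_holes_alt S
instance (S : String) (out : Int × Int) : Decidable (Spec_alpha_with_and_without_holes S out) := by unfold Spec_alpha_with_and_without_holes; infer_instance

-- ===== CLAIM (what is proved, stated in full; the proofs are below) =====
def Claim_equal_alpha_with_and_without_holes : Prop := ∀ (S : String), Dom_alpha_with_and_without_holes S → Spec_alpha_with_and_without_holes S (alpha_with_and_without_holes S)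

-- ===== LEMMAS AND PROOFS =====

def pvHoleB (ch : Char) : Bool := ch ∈ pvHoles

theorem pvHole_iff (ch : Char) :
    (ch ∈ alphaWithHolesLower ∨ ch ∈ alphaWithHolesUpper) ↔ ch ∈ pvHoles := by
  have h : pvHoles = alphaWithHolesLower ++ alphaWithHolesUpper := rfl
  rw [h, List.mem_append]

-- A's loop computes (countP, length - countP) of the hole predicate
theorem pvFoldA (l : List Char) : ∀ (w wo : Int),
    l.foldl (fun (st : Int × Int) ch =>
      if ch ∈ alphaWithHolesLower ∨ ch ∈ alphaWithHolesUpper then (st.1 + 1, st.2)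
      else (st.1, st.2 + 1)) (w, wo)
    = (w + (l.countP pvHoleB : Int),
       wo + (l.length : Int) - (l.countP pvHoleB : Int)) := by
  induction l with
  | nil => intro w wo; simp
  | cons x xs ih =>
    intro w wo
    by_cases h : x ∈ alphaWithHolesLower ∨ x ∈ alphaWithHolesUpper
    · have hb : pvHoleB x = true := by
        simp [pvHoleB, ← pvHole_iff]; exact h
      simp only [List.foldl_cons, if_pos h, ih, List.countP_cons, hb, List.length_cons]
      simp only [Prod.mk.injEq]; push_cast; omega
    · have hb : pvHoleB x = false := by
        simp [pvHoleB, ← pvHole_iff]; simpa using h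
      simp only [List.foldl_cons, if_neg h, ih, List.countP_cons, hb, List.length_cons]
      simp only [Prod.mk.injEq]; push_cast; omega

-- the 0/1 indicator summed over a duplicate-free list is a membership test
theorem pvSumIndicator (x : Char) (hs : List Char) (hnd : hs.Nodup) :
    (hs.map (fun c => if x = c then (1 : Int) else 0)).sum
      = if x ∈ hs then 1 else 0 := by
  revert hnd
  induction hs with
  | nil => simp
  | cons h t ih =>
    intro hnd
    simp only [List.nodup_cons] at hnd
    by_cases hx : x = h
    · subst hx
      simp [List.sum_cons, ih hnd.2, hnd.1]
    · simp [List.sum_cons, hx, ih hnd.2]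

-- sum of per-letter counts over the (duplicate-free) hole alphabet = countP membership
theorem pvSumCounts (l : List Char) :
    (pvHoles.map (fun c => (PySem.List.count l c : Int))).sum
      = (l.countP pvHoleB : Int) := by
  induction l with
  | nil => simp [PySem.List.count]
  | cons x xs ih =>
    have hcnt : ∀ c, PySem.List.count (x :: xs) c
        = PySem.List.count xs c + (if x = c then 1 else 0) := by
      intro c
      by_cases h : x = c
      · subst h; simp [PySem.List.count, List.count_cons]
      · simp [PySem.List.count, List.count_cons, h, Ne.symm h]
    have hsum : (pvHoles.map (fun c => (PySem.List.count (x :: xs) c : Int))).sum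
        = (pvHoles.map (fun c => (PySem.List.count xs c : Int))).sum
          + (pvHoles.map (fun c => if x = c then (1 : Int) else 0)).sum := by
      rw [← List.sum_map_add]
      congr 1
      apply List.map_congr_left
      intro c _
      rw [hcnt]
      push_cast
      split_ifs <;> norm_num
    rw [hsum, ih, pvSumIndicator x pvHoles (by decide), List.countP_cons]
    by_cases hx : x ∈ pvHoles
    · have hb : pvHoleB x = true := by simp [pvHoleB, hx]
      simp [hx, hb]
    · have hb : pvHoleB x = false := by simp [pvHoleB, hx]
      simp [hx, hb]

-- ===== VERDICT (by name: the statement is the Claim_ definition above) =====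
theorem alpha_with_and_without_holes_spec : Claim_equal_alpha_with_and_without_holes := by
  intro S _
  unfold Spec_alpha_with_and_without_holes alpha_with_and_without_holes alpha_with_and_without_holes_alt
  rw [pvFoldA]
  simp only [pvSumCounts, Prod.mk.injEq]
  omega
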